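-- pv_equiv track=rewrite | github.com/xnikox28/discordRally | comandos/panel/blocks/SIETE_DIAS.fixed.py | _autosize_grid
-- ===== SOURCE A (Python) =====
-- from typing import Any, Iterable, List, Optional, Tuple
--
-- def _autosize_grid(inner_w: int, cell_w: int, gap: int, n: int = 7) -> Tuple[int, int]:
--     """Ajusta cell_w/gap para que n tiles quepan en inner_w sin overflow."""
--     total = cell_w * n + gap * (n - 1)
--     if total <= inner_w:
--         # centrar con gap intacto
--         return cell_w, gap
--     # Reducir cell_w primero hasta un mínimo razonable, luego gap
--     min_cell = 36
--     min_gap = 4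
--     cw = cell_w
--     gp = gap
--     # Reduce mientras no quepa
--     while cw > min_cell and cw * n + gp * (n - 1) > inner_w:
--         cw -= 1
--     while gp > min_gap and cw * n + gp * (n - 1) > inner_w:
--         gp -= 1
--     # Si todavía no cabe, forzar ajuste exacto distribuyendo espacio
--     if cw * n + gp * (n - 1) > inner_w:
--         cw = max(min_cell, (inner_w - gp * (n - 1)) // n)
--         if cw * n + gp * (n - 1) > inner_w:
--             gp = max(min_gap, (inner_w - cw * n) // (n - 1))
--     return cw, gp
-- ===== SOURCE B (Python) =====
-- from typing import Tuple
--
-- def _clampdiv(budget: int, k: int, lo: int) -> int: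
--     """floor(budget/k) clamped below at lo."""
--     return max(lo, budget // k)
--
-- def _solve(x: int, lo: int, k: int, budget: int) -> int:
--     """Closed form of: while x > lo and x*k > budget: x -= 1."""
--     if x <= lo or x * k <= budget:
--         return x
--     return _clampdiv(budget, k, lo) if k >= 1 else lo
--
-- def _force(inner_w: int, cw: int, gp: int, n: int) -> Tuple[int, int]:
--     """Exact distribution of remaining space when shrinking was not enough."""
--     if cw * n + gp * (n - 1) <= inner_w:
--         return cw, gp
--     cw = _clampdiv(inner_w - gp * (n - 1), n, 36)
--     if cw * n + gp * (n - 1) <= inner_w: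
--         return cw, gp
--     return cw, _clampdiv(inner_w - cw * n, n - 1, 4)
--
-- def _autosize_grid(inner_w: int, cell_w: int, gap: int, n: int = 7) -> Tuple[int, int]:
--     """O(1): solve the fit inequalities in closed form instead of decrementing."""
--     if cell_w * n + gap * (n - 1) <= inner_w:
--         return cell_w, gap
--     cw = _solve(cell_w, 36, n, inner_w - gap * (n - 1))
--     gp = _solve(gap, 4, n - 1, inner_w - cw * n)
--     return _force(inner_w, cw, gp, n)
-- ===== Notes on version B (the rewrite author's own statement) =====
-- stated objective: faster
-- what changed: Replaces A's two decrement-by-one while-loops with a closed-form solver (floor division clamped at the minimum) applied through small helper functions; Pre_ excludes only the inputs where Python A raises ZeroDivisionError in its fallback (n=0 with inner_w+gap<0; n=1 with cell_w>inner_w and inner_w<36), where B raises too.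
import Mathlib
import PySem

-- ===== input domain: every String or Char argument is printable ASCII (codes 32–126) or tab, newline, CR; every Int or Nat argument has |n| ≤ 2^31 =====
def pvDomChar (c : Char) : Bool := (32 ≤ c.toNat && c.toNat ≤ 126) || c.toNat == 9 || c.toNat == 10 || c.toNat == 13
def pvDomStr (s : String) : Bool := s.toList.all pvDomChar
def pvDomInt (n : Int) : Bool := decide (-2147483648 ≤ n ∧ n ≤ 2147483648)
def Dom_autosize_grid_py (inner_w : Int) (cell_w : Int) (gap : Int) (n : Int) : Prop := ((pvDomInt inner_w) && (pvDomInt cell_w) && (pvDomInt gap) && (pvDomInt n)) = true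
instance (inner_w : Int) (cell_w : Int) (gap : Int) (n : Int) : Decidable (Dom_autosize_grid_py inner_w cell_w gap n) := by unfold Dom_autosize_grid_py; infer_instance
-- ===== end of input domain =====

-- ===== PORT A =====
-- B replaces A's decrement-by-one loops with closed-form clamped floor divisions (helpers below).
-- generic port of A's decrement loop: while x > lo and x*c + off > bound: x -= 1
def pvDecLoop (lo c off bound : Int) (x : Int) : Int :=
  if h : lo < x ∧ bound < x * c + off then pvDecLoop lo c off bound (x - 1) else x
termination_by (x - lo).toNat
decreasing_by omega

def autosize_grid_py (inner_w : Int) (cell_w : Int) (gap : Int) (n : Int) : Int × Int :=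
  let total := cell_w * n + gap * (n - 1)
  if total ≤ inner_w then (cell_w, gap)
  else
    let cw := pvDecLoop 36 n (gap * (n - 1)) inner_w cell_w
    let gp := pvDecLoop 4 (n - 1) (cw * n) inner_w gap
    if inner_w < cw * n + gp * (n - 1) then
      let cw2 := max 36 (PySem.Int.floordiv (inner_w - gp * (n - 1)) n)
      if inner_w < cw2 * n + gp * (n - 1) then
        (cw2, max 4 (PySem.Int.floordiv (inner_w - cw2 * n) (n - 1)))
      else (cw2, gp)
    else (cw, gp)

-- ===== PORT B =====
-- floor(budget/k) clamped below at lo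
def pvClampdiv (budget k lo : Int) : Int := max lo (PySem.Int.floordiv budget k)

-- closed form of: while x > lo and x*k > budget: x -= 1
def pvSolve (x lo k budget : Int) : Int :=
  if x ≤ lo ∨ x * k ≤ budget then x
  else if 1 ≤ k then pvClampdiv budget k lo else lo

-- exact distribution of remaining space when shrinking was not enough
def pvForce (inner_w cw gp n : Int) : Int × Int :=
  if cw * n + gp * (n - 1) ≤ inner_w then (cw, gp)
  else
    let cw2 := pvClampdiv (inner_w - gp * (n - 1)) n 36
    if cw2 * n + gp * (n - 1) ≤ inner_w then (cw2, gp)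
    else (cw2, pvClampdiv (inner_w - cw2 * n) (n - 1) 4)

def autosize_grid_py_alt (inner_w : Int) (cell_w : Int) (gap : Int) (n : Int) : Int × Int :=
  if cell_w * n + gap * (n - 1) ≤ inner_w then (cell_w, gap)
  else
    let cw := pvSolve cell_w 36 n (inner_w - gap * (n - 1))
    let gp := pvSolve gap 4 (n - 1) (inner_w - cw * n)
    pvForce inner_w cw gp n

-- ===== PRECONDITION & SPEC =====
-- Pre_ excludes exactly the inputs on which Python A raises ZeroDivisionError in its
-- fallback (division by n when n = 0, by n-1 when n = 1); B raises there as well.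
def Pre_autosize_grid_py (inner_w : Int) (cell_w : Int) (gap : Int) (n : Int) : Prop :=
  ¬ (n = 0 ∧ inner_w + gap < 0) ∧ ¬ (n = 1 ∧ inner_w < cell_w ∧ inner_w < 36)
instance (inner_w : Int) (cell_w : Int) (gap : Int) (n : Int) : Decidable (Pre_autosize_grid_py inner_w cell_w gap n) := by unfold Pre_autosize_grid_py; infer_instance

def pvWitness_autosize_grid_py : Int × Int × Int × Int := (300, 60, 8, 7)

def Spec_autosize_grid_py (inner_w : Int) (cell_w : Int) (gap : Int) (n : Int) (out : Int × Int) : Prop := out = autosize_grid_py_alt inner_w cell_w gap n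
instance (inner_w : Int) (cell_w : Int) (gap : Int) (n : Int) (out : Int × Int) : Decidable (Spec_autosize_grid_py inner_w cell_w gap n out) := by unfold Spec_autosize_grid_py; infer_instance

-- ===== CLAIM =====
def Claim_equal_autosize_grid_py : Prop := ∀ (inner_w : Int) (cell_w : Int) (gap : Int) (n : Int), Dom_autosize_grid_py inner_w cell_w gap n → Pre_autosize_grid_py inner_w cell_w gap n → Spec_autosize_grid_py inner_w cell_w gap n (autosize_grid_py inner_w cell_w gap n)

-- ===== LEMMAS AND PROOFS =====
lemma pvDecLoop_stop (lo c off bound x : Int) (h : ¬ (lo < x ∧ bound < x * c + off)) :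
    pvDecLoop lo c off bound x = x := by
  rw [pvDecLoop]; simp [h]

lemma pvDecLoop_eq (lo c off bound : Int) : ∀ (x : Int), lo < x → bound < x * c + off →
    pvDecLoop lo c off bound x =
      if 1 ≤ c then max lo (PySem.Int.floordiv (bound - off) c) else lo := by
  have H : ∀ (k : Nat) (x : Int), (x - lo).toNat ≤ k → lo < x → bound < x * c + off →
      pvDecLoop lo c off bound x =
        if 1 ≤ c then max lo (PySem.Int.floordiv (bound - off) c) else lo := by
    intro k
    induction k with
    | zero => intro x hk hx _; omega
    | succ k ih =>
      intro x hk hx hT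
      rw [pvDecLoop, dif_pos ⟨hx, hT⟩]
      by_cases hlo : lo < x - 1
      · by_cases hT1 : bound < (x - 1) * c + off
        · exact ih (x - 1) (by omega) hlo hT1
        · rw [pvDecLoop_stop lo c off bound (x - 1) (by tauto)]
          have hc : 1 ≤ c := by nlinarith
          rw [if_pos hc]
          have hd : PySem.Int.floordiv (bound - off) c = x - 1 := by
            rw [PySem.Int.floordiv_eq_iff_of_pos (by omega : (0:Int) < c)]
            constructor
            · linarith
            · have : (x - 1 + 1) * c = x * c := by ring
              linarith
          rw [hd]; omega
      · rw [pvDecLoop_stop lo c off bound (x - 1) (by tauto)]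
        have hx1 : x - 1 = lo := by omega
        rw [hx1]
        split_ifs with hc
        · have : PySem.Int.floordiv (bound - off) c < lo + 1 := by
            rw [PySem.Int.floordiv_lt_iff_lt_mul (by omega : (0:Int) < c)]
            have : x * c = (lo + 1) * c := by rw [show x = lo + 1 by omega]
            linarith
          omega
        · rfl
  intro x hx hT
  exact H (x - lo).toNat x le_rfl hx hT

-- A's decrement loop equals B's closed-form solver (any starting point)
lemma pvDecLoop_eq_pvSolve (lo c off bound x : Int) :
    pvDecLoop lo c off bound x = pvSolve x lo c (bound - off) := by
  unfold pvSolve pvClampdiv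
  by_cases hstop : x ≤ lo ∨ x * c ≤ bound - off
  · rw [if_pos hstop]
    exact pvDecLoop_stop lo c off bound x (by rintro ⟨h1, h2⟩; rcases hstop with h | h <;> linarith)
  · push Not at hstop
    rw [if_neg (by push Not; exact hstop)]
    exact pvDecLoop_eq lo c off bound x (by omega) (by linarith [hstop.2])

-- ===== VERDICT =====
theorem autosize_grid_py_spec : Claim_equal_autosize_grid_py := by
  intro inner_w cell_w gap n _ _
  unfold Spec_autosize_grid_py
  simp only [autosize_grid_py, autosize_grid_py_alt, pvForce, pvClampdiv]
  by_cases h0 : cell_w * n + gap * (n - 1) ≤ inner_w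
  · simp [h0]
  · rw [if_neg h0, if_neg h0]
    rw [show pvDecLoop 36 n (gap * (n - 1)) inner_w cell_w
          = pvSolve cell_w 36 n (inner_w - gap * (n - 1)) by
        exact pvDecLoop_eq_pvSolve 36 n (gap * (n - 1)) inner_w cell_w]
    generalize pvSolve cell_w 36 n (inner_w - gap * (n - 1)) = cw
    rw [show pvDecLoop 4 (n - 1) (cw * n) inner_w gap
          = pvSolve gap 4 (n - 1) (inner_w - cw * n) by
        rw [pvDecLoop_eq_pvSolve 4 (n - 1) (cw * n) inner_w gap]]
    generalize pvSolve gap 4 (n - 1) (inner_w - cw * n) = gp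
    by_cases h1 : cw * n + gp * (n - 1) ≤ inner_w
    · rw [if_neg (by omega), if_pos h1]
    · rw [if_pos (by omega), if_neg h1]
      by_cases h2 : (max 36 (PySem.Int.floordiv (inner_w - gp * (n - 1)) n)) * n + gp * (n - 1) ≤ inner_w
      · rw [if_neg (by omega), if_pos h2]
      · rw [if_pos (by omega), if_neg h2]
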